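-- pv_equiv track=rewrite | github.com/xuyus/onnxsharp | onnxsharp/graph_folder.py | check_range_overlap
-- ===== SOURCE A (Python) =====
-- from typing import List, Set, Tuple
--
-- def check_range_overlap(
--     range_set_1: List[Tuple[int, int]],
--     lengh_1: int,
--     range_set_2: List[Tuple[int, int]],
--     length_2: int,
-- ):
--     """For each range in range_set_1, check if it overlaps with any range in range_set_2"""
--     for s1 in range_set_1:
--         e1 = s1 + lengh_1 - 1
--         for s2 in range_set_2:
--             e2 = s2 + length_2 - 1
--             if not (e1 < s2 or e2 < s1):
--                 return True
--
--     return False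
-- ===== SOURCE B (Python) =====
-- def check_range_overlap(range_set_1, lengh_1, range_set_2, length_2):
--     """Sort range_set_2 once, then for each s1 binary-search for a start s2
--     inside the overlap window [s1 - length_2 + 1, s1 + lengh_1 - 1]."""
--     xs = sorted(range_set_2)
--     n = len(xs)
--     for s1 in range_set_1:
--         lo = s1 - length_2 + 1
--         hi = s1 + lengh_1 - 1
--         # first index with xs[i] >= lo
--         a, b = 0, n
--         while a < b:
--             m = (a + b) // 2
--             if xs[m] < lo:
--                 a = m + 1
--             else:
--                 b = m
--         if a < n and xs[a] <= hi:
--             return True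
--     return False
-- ===== Notes on version B (the rewrite author's own statement) =====
-- stated objective: alternative
-- what changed: Replaces the nested all-pairs scan by sorting range_set_2 once and binary-searching, for each s1, whether some s2 falls in the overlap window [s1-length_2+1, s1+lengh_1-1].
import Mathlib
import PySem

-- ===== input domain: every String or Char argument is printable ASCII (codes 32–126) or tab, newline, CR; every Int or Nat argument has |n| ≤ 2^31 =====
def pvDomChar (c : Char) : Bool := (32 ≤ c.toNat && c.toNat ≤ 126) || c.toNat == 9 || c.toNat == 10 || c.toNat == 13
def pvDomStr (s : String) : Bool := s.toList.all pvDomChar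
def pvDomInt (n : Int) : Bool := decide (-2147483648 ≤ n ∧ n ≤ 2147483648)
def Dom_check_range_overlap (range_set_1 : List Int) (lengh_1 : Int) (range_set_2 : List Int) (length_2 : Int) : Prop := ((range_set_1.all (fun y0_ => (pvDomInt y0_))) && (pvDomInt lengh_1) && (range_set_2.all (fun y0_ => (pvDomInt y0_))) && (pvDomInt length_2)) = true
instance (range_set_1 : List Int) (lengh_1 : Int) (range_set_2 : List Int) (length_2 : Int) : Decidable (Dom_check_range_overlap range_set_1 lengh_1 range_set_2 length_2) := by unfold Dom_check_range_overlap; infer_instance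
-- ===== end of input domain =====

-- B sorts range_set_2 once and binary-searches each s1's overlap window instead of A's nested all-pairs scan (objective: alternative).

-- ===== PORT A =====
-- inner loop: for s2 in range_set_2
def pvInnerA (s1 e1 length_2 : Int) : List Int → Bool
  | [] => false
  | s2 :: rest =>
    let e2 := s2 + length_2 - 1
    if !(decide (e1 < s2) || decide (e2 < s1)) then true else pvInnerA s1 e1 length_2 rest

-- outer loop: for s1 in range_set_1
def pvOuterA (lengh_1 : Int) (range_set_2 : List Int) (length_2 : Int) : List Int → Bool
  | [] => false
  | s1 :: rest =>
    let e1 := s1 + lengh_1 - 1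
    if pvInnerA s1 e1 length_2 range_set_2 then true else pvOuterA lengh_1 range_set_2 length_2 rest

def check_range_overlap (range_set_1 : List Int) (lengh_1 : Int) (range_set_2 : List Int) (length_2 : Int) : Bool :=
  pvOuterA lengh_1 range_set_2 length_2 range_set_1

-- ===== PORT B =====
-- binary search: first index i in [a,b) with xs[i] >= lo (Source B's while loop)
def pvBisect (xs : List Int) (lo : Int) (a b : Nat) : Nat :=
  if _h : a < b then
    if xs.getD ((a + b) / 2) 0 < lo then pvBisect xs lo ((a + b) / 2 + 1) b
    else pvBisect xs lo a ((a + b) / 2)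
  else a
termination_by b - a
decreasing_by all_goals omega

-- loop: for s1 in range_set_1 (xs = sorted range_set_2, n = len(xs))
def pvGoB (lengh_1 length_2 : Int) (xs : List Int) (n : Nat) : List Int → Bool
  | [] => false
  | s1 :: rest =>
    let lo := s1 - length_2 + 1
    let hi := s1 + lengh_1 - 1
    let a := pvBisect xs lo 0 n
    if a < n ∧ xs.getD a 0 ≤ hi then true else pvGoB lengh_1 length_2 xs n rest

def check_range_overlap_alt (range_set_1 : List Int) (lengh_1 : Int) (range_set_2 : List Int) (length_2 : Int) : Bool :=
  let xs := PySem.List.sorted range_set_2 (fun x => x) false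
  pvGoB lengh_1 length_2 xs xs.length range_set_1

-- ===== PRECONDITION & SPEC =====
def Spec_check_range_overlap (range_set_1 : List Int) (lengh_1 : Int) (range_set_2 : List Int) (length_2 : Int) (out : Bool) : Prop := out = check_range_overlap_alt range_set_1 lengh_1 range_set_2 length_2
instance (range_set_1 : List Int) (lengh_1 : Int) (range_set_2 : List Int) (length_2 : Int) (out : Bool) : Decidable (Spec_check_range_overlap range_set_1 lengh_1 range_set_2 length_2 out) := by unfold Spec_check_range_overlap; infer_instance

-- ===== CLAIM (what is proved, stated in full; the proofs are below) =====
def Claim_equal_check_range_overlap : Prop := ∀ (range_set_1 : List Int) (lengh_1 : Int) (range_set_2 : List Int) (length_2 : Int), Dom_check_range_overlap range_set_1 lengh_1 range_set_2 length_2 → Spec_check_range_overlap range_set_1 lengh_1 range_set_2 length_2 (check_range_overlap range_set_1 lengh_1 range_set_2 length_2)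

-- ===== LEMMAS AND PROOFS =====

-- A's inner loop is an `any` over range_set_2 of the window condition
theorem pvInnerA_eq_any (s1 l1 l2 : Int) (rs2 : List Int) :
    pvInnerA s1 (s1 + l1 - 1) l2 rs2
      = rs2.any (fun s2 => decide (s1 - l2 + 1 ≤ s2 ∧ s2 ≤ s1 + l1 - 1)) := by
  induction rs2 with
  | nil => rfl
  | cons s2 rest ih =>
    have hc : (!(decide (s1 + l1 - 1 < s2) || decide (s2 + l2 - 1 < s1)))
        = decide (s1 - l2 + 1 ≤ s2 ∧ s2 ≤ s1 + l1 - 1) := by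
      by_cases hp : s1 - l2 + 1 ≤ s2 ∧ s2 ≤ s1 + l1 - 1
      · rw [decide_eq_true hp]
        simp only [Bool.not_eq_eq_eq_not, Bool.not_true, Bool.or_eq_false_iff,
          decide_eq_false_iff_not, not_lt]
        omega
      · rw [decide_eq_false hp]
        simp only [Bool.not_eq_eq_eq_not, Bool.not_false, Bool.or_eq_true_iff,
          decide_eq_true_eq]
        omega
    show (if (!(decide (s1 + l1 - 1 < s2) || decide (s2 + l2 - 1 < s1))) = true then true
          else pvInnerA s1 (s1 + l1 - 1) l2 rest)
        = ((decide (s1 - l2 + 1 ≤ s2 ∧ s2 ≤ s1 + l1 - 1))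
            || rest.any fun s2 => decide (s1 - l2 + 1 ≤ s2 ∧ s2 ≤ s1 + l1 - 1))
    rw [hc, ih]
    cases decide (s1 - l2 + 1 ≤ s2 ∧ s2 ≤ s1 + l1 - 1) <;> simp

theorem checkA_eq_any (rs1 : List Int) (l1 : Int) (rs2 : List Int) (l2 : Int) :
    check_range_overlap rs1 l1 rs2 l2
      = rs1.any (fun s1 => rs2.any (fun s2 => decide (s1 - l2 + 1 ≤ s2 ∧ s2 ≤ s1 + l1 - 1))) := by
  unfold check_range_overlap
  induction rs1 with
  | nil => rfl
  | cons s1 rest ih =>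
    simp only [pvOuterA, List.any_cons, ih, pvInnerA_eq_any]
    cases hc : rs2.any (fun s2 => decide (s1 - l2 + 1 ≤ s2 ∧ s2 ≤ s1 + l1 - 1))
    · simp
    · simp [hc]

-- sorted access is monotone
theorem sorted_getD_mono {xs : List Int} (hs : xs.Pairwise (· ≤ ·))
    {i j : Nat} (hij : i ≤ j) (hj : j < xs.length) :
    xs.getD i 0 ≤ xs.getD j 0 := by
  rcases Nat.eq_or_lt_of_le hij with rfl | hlt
  · exact le_refl _
  · rw [List.getD_eq_getElem _ _ (lt_trans hlt hj), List.getD_eq_getElem _ _ hj]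
    exact (List.pairwise_iff_getElem.mp hs) i j _ _ hlt

-- the binary search partitions a sorted list at lo
theorem pvBisect_inv (xs : List Int) (lo : Int) (hs : xs.Pairwise (· ≤ ·)) :
    ∀ a b : Nat, b ≤ xs.length → a ≤ b →
    (∀ i, i < a → i < xs.length → xs.getD i 0 < lo) →
    (∀ i, b ≤ i → i < xs.length → lo ≤ xs.getD i 0) →
    (∀ i, i < pvBisect xs lo a b → i < xs.length → xs.getD i 0 < lo) ∧
    (∀ i, pvBisect xs lo a b ≤ i → i < xs.length → lo ≤ xs.getD i 0) := by
  intro a b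
  induction a, b using pvBisect.induct xs lo with
  | case1 a b h hlt ih =>
    intro hb hab hlow hhigh
    rw [pvBisect, dif_pos h, if_pos hlt]
    refine ih hb (by omega) ?_ hhigh
    intro i hi hilen
    by_cases hia : i < a
    · exact hlow i hia hilen
    · exact lt_of_le_of_lt (sorted_getD_mono hs (by omega) (by omega)) hlt
  | case2 a b h hge ih =>
    intro hb hab hlow hhigh
    rw [pvBisect, dif_pos h, if_neg hge]
    refine ih (by omega) (by omega) hlow ?_
    intro i hi hilen
    exact le_trans (not_lt.mp hge) (sorted_getD_mono hs hi hilen)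
  | case3 a b h =>
    intro hb hab hlow hhigh
    rw [pvBisect, dif_neg h]
    exact ⟨hlow, fun i hi hilen => hhigh i (by omega) hilen⟩

-- "some element of the sorted list lies in [lo,hi]" ↔ the bisect probe
theorem bisect_window (xs : List Int) (lo hi : Int) (hs : xs.Pairwise (· ≤ ·)) :
    (decide (pvBisect xs lo 0 xs.length < xs.length ∧
             xs.getD (pvBisect xs lo 0 xs.length) 0 ≤ hi))
      = xs.any (fun x => decide (lo ≤ x ∧ x ≤ hi)) := by
  obtain ⟨hlow, hhigh⟩ := pvBisect_inv xs lo hs 0 xs.length (le_refl _) (Nat.zero_le _)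
    (fun i hi _ => absurd hi (Nat.not_lt_zero i)) (fun i hi hilen => absurd hilen (by omega))
  set r := pvBisect xs lo 0 xs.length with hr
  by_cases hcase : r < xs.length ∧ xs.getD r 0 ≤ hi
  · rw [decide_eq_true hcase]
    symm
    rw [List.any_eq_true]
    refine ⟨xs.getD r 0, List.getD_eq_getElem _ _ hcase.1 ▸ List.getElem_mem _, ?_⟩
    exact decide_eq_true ⟨hhigh r (le_refl _) hcase.1, hcase.2⟩
  · rw [decide_eq_false hcase]
    symm
    rw [List.any_eq_false]
    intro x hx
    simp only [decide_eq_true_eq]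
    intro ⟨hlo, hhi⟩
    obtain ⟨i, hilen, rfl⟩ := List.getElem_of_mem hx
    rw [← List.getD_eq_getElem _ 0 hilen] at hlo hhi
    have hir : ¬ i < r := fun hir => absurd (hlow i hir hilen) (not_lt.mpr hlo)
    exact hcase ⟨by omega, le_trans (sorted_getD_mono hs (by omega) hilen) hhi⟩

theorem checkB_eq_any (rs1 : List Int) (l1 : Int) (rs2 : List Int) (l2 : Int) :
    check_range_overlap_alt rs1 l1 rs2 l2
      = rs1.any (fun s1 => rs2.any (fun s2 => decide (s1 - l2 + 1 ≤ s2 ∧ s2 ≤ s1 + l1 - 1))) := by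
  unfold check_range_overlap_alt
  induction rs1 with
  | nil => rfl
  | cons s1 rest ih =>
    simp only [pvGoB, List.any_cons, ih]
    have hwin := bisect_window (PySem.List.sorted rs2 (fun x => x) false)
      (s1 - l2 + 1) (s1 + l1 - 1) (PySem.List.sorted_pairwise rs2 (fun x => x))
    have hmem : ((PySem.List.sorted rs2 (fun x => x) false).any
          (fun x => decide (s1 - l2 + 1 ≤ x ∧ x ≤ s1 + l1 - 1)))
        = rs2.any (fun s2 => decide (s1 - l2 + 1 ≤ s2 ∧ s2 ≤ s1 + l1 - 1)) := by
      rcases hb : rs2.any (fun s2 => decide (s1 - l2 + 1 ≤ s2 ∧ s2 ≤ s1 + l1 - 1)) with _ | _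
      · rw [List.any_eq_false] at hb ⊢
        intro x hx
        exact hb x ((PySem.List.mem_sorted _ _ _ _).mp hx)
      · rw [List.any_eq_true] at hb ⊢
        obtain ⟨x, hx, hpx⟩ := hb
        exact ⟨x, (PySem.List.mem_sorted _ _ _ _).mpr hx, hpx⟩
    rw [← hmem, ← hwin]
    by_cases h : (pvBisect (PySem.List.sorted rs2 (fun x => x) false) (s1 - l2 + 1) 0
          (PySem.List.sorted rs2 (fun x => x) false).length
        < (PySem.List.sorted rs2 (fun x => x) false).length ∧
        (PySem.List.sorted rs2 (fun x => x) false).getD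
          (pvBisect (PySem.List.sorted rs2 (fun x => x) false) (s1 - l2 + 1) 0
            (PySem.List.sorted rs2 (fun x => x) false).length) 0 ≤ s1 + l1 - 1)
    · simp only [if_pos h, decide_eq_true h, Bool.true_or]
    · simp only [if_neg h, decide_eq_false h, Bool.false_or]

-- ===== VERDICT (by name: the statement is the Claim_ definition above) =====
theorem check_range_overlap_spec : Claim_equal_check_range_overlap := by
  intro rs1 l1 rs2 l2 _
  unfold Spec_check_range_overlap
  rw [checkA_eq_any, checkB_eq_any]
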